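-- pv_equiv track=rewrite | github.com/1000zoo/python-practice | thisandthat/dotw.py | month_rest
-- ===== SOURCE A (Python) =====
-- def month_rest(month, yun = False):
--     if month == 1:
--         return 0
--     max_day = [3, 0, 3, 2, 3, 2, 3, 3, 2, 3, 2, 3]
--     if yun:
--         max_day[1] = 1
--
--     ret = 0
--     for i in range(month - 1):
--         ret += max_day[i]
--
--     return ret % 7
-- ===== SOURCE B (Python) =====
-- # Prefix-sum table instead of the loop: O(1) lookup; leap year only shifts totals from March on.
-- _CUM = [0, 3, 3, 6, 8, 11, 13, 16, 19, 21, 24, 26, 29]  # cum[k] = sum of first k monthly offsets (non-leap)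
--
-- def month_rest(month, yun = False):
--     if month <= 1:
--         return 0
--     return (_CUM[month - 1] + (1 if yun and month >= 3 else 0)) % 7
-- ===== Notes on version B (the rewrite author's own statement) =====
-- stated objective: faster
-- what changed: Replaces the per-month summation loop with a hardcoded cumulative prefix-sum table (plus a +1 shift for leap years from March on), turning the O(month) loop into an O(1) lookup.
import Mathlib
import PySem

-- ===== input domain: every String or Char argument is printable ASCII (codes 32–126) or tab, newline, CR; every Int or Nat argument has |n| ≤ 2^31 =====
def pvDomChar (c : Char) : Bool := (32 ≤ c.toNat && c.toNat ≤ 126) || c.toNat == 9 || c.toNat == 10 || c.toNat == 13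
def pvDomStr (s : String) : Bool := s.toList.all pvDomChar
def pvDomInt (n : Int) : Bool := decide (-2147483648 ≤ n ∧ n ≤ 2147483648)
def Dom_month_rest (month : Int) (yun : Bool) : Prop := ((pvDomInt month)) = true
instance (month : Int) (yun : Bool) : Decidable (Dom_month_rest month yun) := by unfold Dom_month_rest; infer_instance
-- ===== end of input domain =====

-- B replaces A's summation loop with a hardcoded prefix-sum table (O(1) lookup).

-- ===== PORT A =====
def month_rest (month : Int) (yun : Bool) : Int :=
  if month == 1 then 0
  else
    let max_day : List Int := [3, 0, 3, 2, 3, 2, 3, 3, 2, 3, 2, 3]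
    let max_day := if yun then max_day.set 1 1 else max_day
    let ret := (PySem.List.pyRange 0 (month - 1) 1).foldl
      (fun r i => r + (PySem.List.pyGet? max_day i).getD 0) 0
    PySem.Int.mod ret 7

-- ===== PORT B =====
def month_rest_alt (month : Int) (yun : Bool) : Int :=
  if month ≤ 1 then 0
  else
    let cum : List Int := [0, 3, 3, 6, 8, 11, 13, 16, 19, 21, 24, 26, 29]
    PySem.Int.mod ((PySem.List.pyGet? cum (month - 1)).getD 0
      + (if yun && month ≥ 3 then 1 else 0)) 7

-- ===== PRECONDITION & SPEC =====
-- Pre_ excludes month ≥ 14, on which A raises IndexError (B raises too).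
def Pre_month_rest (month : Int) (yun : Bool) : Prop := month ≤ 13
instance (month : Int) (yun : Bool) : Decidable (Pre_month_rest month yun) := by unfold Pre_month_rest; infer_instance
def pvWitness_month_rest : Int × Bool := (7, true)

def Spec_month_rest (month : Int) (yun : Bool) (out : Int) : Prop := out = month_rest_alt month yun
instance (month : Int) (yun : Bool) (out : Int) : Decidable (Spec_month_rest month yun out) := by unfold Spec_month_rest; infer_instance

-- ===== CLAIM (what is proved, stated in full; the proofs are below) =====
def Claim_equal_month_rest : Prop := ∀ (month : Int) (yun : Bool), Dom_month_rest month yun → Pre_month_rest month yun → Spec_month_rest month yun (month_rest month yun)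

-- ===== LEMMAS AND PROOFS =====

lemma month_rest_nonpos (month : Int) (yun : Bool) (h : month ≤ 1) :
    month_rest month yun = 0 := by
  unfold month_rest
  rcases eq_or_lt_of_le h with h1 | h1
  · simp [h1.symm]
  · have hne : ¬ (month == 1) = true := by simp; omega
    simp only [hne, if_false]
    rw [PySem.List.pyRange_one_eq_nil (by omega)]
    simp [PySem.Int.mod]

lemma month_rest_alt_nonpos (month : Int) (yun : Bool) (h : month ≤ 1) :
    month_rest_alt month yun = 0 := by
  unfold month_rest_alt
  simp [h]

-- ===== VERDICT (by name: the statement is the Claim_ definition above) =====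
theorem month_rest_spec : Claim_equal_month_rest := by
  intro month yun _ hpre
  unfold Spec_month_rest
  by_cases h1 : month ≤ 1
  · rw [month_rest_nonpos month yun h1, month_rest_alt_nonpos month yun h1]
  · have h2 : 2 ≤ month := by omega
    have h13 : month ≤ 13 := hpre
    interval_cases month <;> cases yun <;> decide
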